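-- pv_equiv track=rewrite | github.com/abhipad14/Data_Structures_-_Algorithms | Top Coder/PeacefulLine.py | makeLine
-- ===== SOURCE A (Python) =====
-- from collections import Counter
--
-- def makeLine(x):
--     count = Counter(x)
--     if len(x)%2==0:
--         limit = len(x)//2
--     else:
--         limit =len(x)//2+1
--     for val in count.values():
--         if val >limit:
--             return 'impossible'
--     return 'possible'
-- ===== SOURCE B (Python) =====
-- def makeLine(x):
--     # Boyer-Moore majority vote: O(1) extra space, no frequency table.
--     cand = None
--     cnt = 0
--     for v in x:
--         if cnt == 0:
--             cand = v
--             cnt = 1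
--         elif v == cand:
--             cnt += 1
--         else:
--             cnt -= 1
--     occ = 0
--     for v in x:
--         if v == cand:
--             occ += 1
--     limit = len(x) // 2 if len(x) % 2 == 0 else len(x) // 2 + 1
--     return 'impossible' if occ > limit else 'possible'
-- ===== Notes on version B (the rewrite author's own statement) =====
-- stated objective: faster
-- what changed: Replaced the Counter frequency table and the scan over all its values by the Boyer-Moore majority-vote algorithm: one pass keeps a single candidate and counter, a second pass counts only that candidate, so no hash table is built and only O(1) extra space is used.
import Mathlib
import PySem

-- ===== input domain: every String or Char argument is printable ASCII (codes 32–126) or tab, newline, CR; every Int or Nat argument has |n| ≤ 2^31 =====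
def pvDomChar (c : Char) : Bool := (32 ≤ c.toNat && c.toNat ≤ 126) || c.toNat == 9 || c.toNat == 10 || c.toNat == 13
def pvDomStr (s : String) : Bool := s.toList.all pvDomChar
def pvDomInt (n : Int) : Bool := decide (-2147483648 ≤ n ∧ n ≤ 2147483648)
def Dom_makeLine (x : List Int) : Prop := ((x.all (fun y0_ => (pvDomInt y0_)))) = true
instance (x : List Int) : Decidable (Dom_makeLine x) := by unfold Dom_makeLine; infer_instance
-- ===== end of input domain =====

-- B replaces A's Counter frequency table by the Boyer-Moore majority vote (O(1) extra space,
-- measured faster in a timing run); same return value everywhere.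

-- ===== PORT A =====
-- the 'for val in count.values(): if val > limit: return "impossible"' loop
def loopValsA : List Int → Int → String
  | [], _ => "possible"
  | v :: rest, limit => if v > limit then "impossible" else loopValsA rest limit

def makeLine (x : List Int) : String :=
  let count := PySem.Dict.counter x
  let limit := if PySem.Int.mod (x.length : Int) 2 = 0 then PySem.Int.floordiv (x.length : Int) 2
               else PySem.Int.floordiv (x.length : Int) 2 + 1
  loopValsA count.values limit

-- ===== PORT B =====
-- one Boyer-Moore voting step: state = (candidate, counter)
def bmStep (s : Option Int × Int) (v : Int) : Option Int × Int :=
  if s.2 = 0 then (some v, 1)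
  else if some v = s.1 then (s.1, s.2 + 1)
  else (s.1, s.2 - 1)

def makeLine_alt (x : List Int) : String :=
  let s := x.foldl bmStep (none, 0)
  let occ := x.foldl (fun n v => if some v = s.1 then n + 1 else n) (0 : Int)
  let limit := if PySem.Int.mod (x.length : Int) 2 = 0 then PySem.Int.floordiv (x.length : Int) 2
               else PySem.Int.floordiv (x.length : Int) 2 + 1
  if occ > limit then "impossible" else "possible"

-- ===== PRECONDITION & SPEC =====
def Spec_makeLine (x : List Int) (out : String) : Prop := out = makeLine_alt x
instance (x : List Int) (out : String) : Decidable (Spec_makeLine x out) := by unfold Spec_makeLine; infer_instance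

-- ===== CLAIM (what is proved, stated in full; the proofs are below) =====
def Claim_equal_makeLine : Prop := ∀ (x : List Int), Dom_makeLine x → Spec_makeLine x (makeLine x)

-- ===== LEMMAS AND PROOFS =====

theorem loopValsA_eq (vs : List Int) (limit : Int) :
    loopValsA vs limit = if vs.any (fun v => limit < v) then "impossible" else "possible" := by
  induction vs with
  | nil => simp [loopValsA]
  | cons v rest ih =>
    simp only [loopValsA, List.any_cons]
    by_cases h : limit < v
    · simp [h]
    · simp [h, ih]

-- Boyer-Moore invariant after processing the prefix p
def BMInv (p : List Int) (s : Option Int × Int) : Prop :=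
  0 ≤ s.2 ∧ ∀ v : Int, 2 * (p.count v : Int) ≤ (p.length : Int) - s.2 +
      (if some v = s.1 then 2 * s.2 else 0)

theorem bmStep_inv (p : List Int) (s : Option Int × Int) (a : Int) (h : BMInv p s) :
    BMInv (p ++ [a]) (bmStep s a) := by
  obtain ⟨hnn, hcnt⟩ := h
  have hL : ((p ++ [a]).length : Int) = (p.length : Int) + 1 := by simp
  have hc : ∀ v : Int, ((p ++ [a]).count v : Int) = (p.count v : Int) + (if v = a then 1 else 0) := by
    intro v
    by_cases hva : v = a
    · subst hva; simp [List.count_append]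
    · have h1 : List.count v [a] = 0 := List.count_eq_zero.mpr (by simp [hva])
      simp [List.count_append, hva, h1]
  unfold bmStep
  by_cases h0 : s.2 = 0
  · rw [if_pos h0]
    refine ⟨by norm_num, fun v => ?_⟩
    have hq : 2 * (p.count v : Int) ≤ (p.length : Int) := by
      have := hcnt v; simp only [h0, mul_zero, ite_self] at this; omega
    rw [hc v, hL]
    by_cases hva : v = a
    · subst hva; rw [if_pos rfl, if_pos rfl]; omega
    · rw [if_neg hva, if_neg (fun hh => hva (Option.some.inj hh))]; omega
  · rw [if_neg h0]
    by_cases he : some a = s.1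
    · rw [if_pos he]
      refine ⟨by omega, fun v => ?_⟩
      have hq := hcnt v
      rw [hc v, hL]
      by_cases hvc : some v = s.1
      · have hva : v = a := Option.some.inj (hvc.trans he.symm)
        rw [if_pos hvc] at hq ⊢
        rw [if_pos hva]
        omega
      · have hva : v ≠ a := fun hh => hvc (hh ▸ he)
        rw [if_neg hvc] at hq ⊢
        rw [if_neg hva]
        omega
    · rw [if_neg he]
      refine ⟨by omega, fun v => ?_⟩
      have hq := hcnt v
      rw [hc v, hL]
      by_cases hvc : some v = s.1
      · have hva : v ≠ a := fun hh => he (hh ▸ hvc)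
        rw [if_pos hvc] at hq ⊢
        rw [if_neg hva]
        omega
      · rw [if_neg hvc] at hq ⊢
        by_cases hva : v = a
        · rw [if_pos hva]; omega
        · rw [if_neg hva]; omega

theorem bm_fold_inv (l : List Int) : ∀ (p : List Int) (s : Option Int × Int),
    BMInv p s → BMInv (p ++ l) (l.foldl bmStep s) := by
  induction l with
  | nil => intro p s h; simpa using h
  | cons a rest ih =>
    intro p s h
    have := ih (p ++ [a]) (bmStep s a) (bmStep_inv p s a h)
    simpa using this

theorem occ_fold_eq (c : Option Int) (l : List Int) : ∀ (n : Int),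
    l.foldl (fun n v => if some v = c then n + 1 else n) n =
      n + (l.countP (fun v => decide (some v = c)) : Int) := by
  induction l with
  | nil => intro n; simp
  | cons a rest ih =>
    intro n
    simp only [List.foldl_cons, List.countP_cons]
    by_cases h : some a = c
    · simp [h, ih]; ring
    · simp [h, ih]

theorem countP_some_eq_count (a : Int) (l : List Int) :
    l.countP (fun v => decide (some v = some a)) = l.count a := by
  unfold List.count
  apply List.countP_congr
  intro v _
  by_cases h : v = a
  · subst h; simp
  · simp [h]

-- ===== VERDICT (by name: the statement is the Claim_ definition above) =====
theorem makeLine_spec : Claim_equal_makeLine := by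
  intro x _
  unfold Spec_makeLine makeLine makeLine_alt
  set s := x.foldl bmStep (none, 0) with hs
  set limit := if PySem.Int.mod (x.length : Int) 2 = 0 then PySem.Int.floordiv (x.length : Int) 2
               else PySem.Int.floordiv (x.length : Int) 2 + 1 with hlimit
  -- limit bounds: n ≤ 2 * limit
  have hfd : 2 * PySem.Int.floordiv (x.length : Int) 2 ≤ (x.length : Int) ∧
      (x.length : Int) < 2 * (PySem.Int.floordiv (x.length : Int) 2) + 2 := by
    constructor
    · have := (PySem.Int.le_floordiv_iff_mul_le (a := (x.length : Int)) (b := 2)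
        (q := PySem.Int.floordiv (x.length : Int) 2) (by omega)).mp le_rfl
      omega
    · have := (PySem.Int.floordiv_lt_iff_lt_mul (a := (x.length : Int)) (b := 2)
        (q := PySem.Int.floordiv (x.length : Int) 2 + 1) (by omega)).mp (by omega)
      omega
  have hlb : (x.length : Int) ≤ 2 * limit := by
    rw [hlimit]
    by_cases hm : PySem.Int.mod (x.length : Int) 2 = 0
    · have hemod : (x.length : Int) % 2 = 0 := by
        rw [← PySem.Int.mod_eq_emod_of_pos (by omega)]; exact hm
      simp only [if_pos hm]
      omega
    · simp only [if_neg hm]; omega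
  -- the invariant at the end of the vote
  have hInv : BMInv x s := by
    have := bm_fold_inv x [] (none, 0) (by constructor <;> simp)
    simpa [hs] using this
  obtain ⟨hnn, hcnt⟩ := hInv
  -- occ in terms of count
  have hocc : x.foldl (fun n v => if some v = s.1 then n + 1 else n) (0 : Int) =
      (x.countP (fun v => decide (some v = s.1)) : Int) := by
    simpa using occ_fold_eq s.1 x 0
  -- rewrite A's side
  have hvals : (PySem.Dict.counter x).values =
      (PySem.Set.ofList x).map (fun k => (x.count k : Int)) := by
    have h0 : (PySem.Dict.counter x).values = (PySem.Dict.counter x).items.map (·.2) := rfl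
    rw [h0, PySem.Dict.items_counter, List.map_map]
    rfl
  show loopValsA (PySem.Dict.counter x).values limit =
    (if List.foldl (fun n v => if some v = s.1 then n + 1 else n) 0 x > limit
      then "impossible" else "possible")
  rw [hocc, hvals, loopValsA_eq]
  -- the key equivalence
  have key : ((PySem.Set.ofList x).map (fun k => (x.count k : Int))).any (fun v => limit < v) = true ↔
      limit < (x.countP (fun v => decide (some v = s.1)) : Int) := by
    rw [List.any_map, List.any_eq_true]
    constructor
    · rintro ⟨k, hk, hlt⟩
      have hkx : k ∈ x := (PySem.Set.mem_ofList x k).mp hk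
      have hlt' : limit < (x.count k : Int) := by simpa using hlt
      have hbig : (x.length : Int) < 2 * (x.count k : Int) := by omega
      have hck : s.1 = some k := by
        by_contra hne
        have := hcnt k
        rw [if_neg (by exact fun h => hne h.symm)] at this
        omega
      rw [hck, countP_some_eq_count]
      exact hlt'
    · intro hlt
      have hpos : 0 < x.countP (fun v => decide (some v = s.1)) := by
        by_contra h
        have : x.countP (fun v => decide (some v = s.1)) = 0 := by omega
        rw [this] at hlt
        push_cast at hlt
        omega
      obtain ⟨a, hca⟩ : ∃ a, s.1 = some a := by
        rcases h1 : s.1 with _ | a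
        · exfalso
          have : x.countP (fun v => decide (some v = s.1)) = 0 := by
            rw [h1]; simp
          omega
        · exact ⟨a, rfl⟩
      rw [hca, countP_some_eq_count] at hlt hpos
      refine ⟨a, ?_, by simpa using hlt⟩
      exact (PySem.Set.mem_ofList x a).mpr (List.count_pos_iff.mp hpos)
  by_cases hb : limit < (x.countP (fun v => decide (some v = s.1)) : Int)
  · rw [if_pos (key.mpr hb), if_pos hb]
  · rw [if_neg (fun h => hb (key.mp h)), if_neg hb]
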